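-- pv_equiv track=rewrite | github.com/l-khali/ufl | ufl/utils/formatting 2.py | camel2underscore
-- ===== SOURCE A (Python) =====
-- def camel2underscore(name):
--     "Convert a CamelCaps string to underscore_syntax."
--     letters = []
--     lastlower = False
--     for l in name:
--         thislower = l.islower()
--         if not thislower:
--             # Don't insert _ between multiple upper case letters
--             if lastlower:
--                 letters.append("_")
--             l = l.lower()
--         lastlower = thislower
--         letters.append(l)
--     return "".join(letters)
-- ===== SOURCE B (Python) =====
-- def camel2underscore(name):
--     "Convert a CamelCaps string to underscore_syntax."
--     # Staged passes: mark lowercase positions, list the word boundaries,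
--     # slice the string at those boundaries, join with '_' and lower once.
--     lowers = [c.islower() for c in name]
--     cuts = [i for i in range(1, len(name)) if lowers[i - 1] and not lowers[i]]
--     parts = []
--     start = 0
--     for cut in cuts:
--         parts.append(name[start:cut])
--         start = cut
--     parts.append(name[start:])
--     return "_".join(parts).lower()
-- ===== Notes on version B (the rewrite author's own statement) =====
-- stated objective: alternative
-- what changed: B works in staged passes over indices instead of A's single char-loop with a lastlower flag: it first computes the list of lowercase flags, then the list of boundary indices (lower followed by non-lower), then slices the string at those indices into words, and finally joins the words with '_' and lowercases the whole result once.
import Mathlib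
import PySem

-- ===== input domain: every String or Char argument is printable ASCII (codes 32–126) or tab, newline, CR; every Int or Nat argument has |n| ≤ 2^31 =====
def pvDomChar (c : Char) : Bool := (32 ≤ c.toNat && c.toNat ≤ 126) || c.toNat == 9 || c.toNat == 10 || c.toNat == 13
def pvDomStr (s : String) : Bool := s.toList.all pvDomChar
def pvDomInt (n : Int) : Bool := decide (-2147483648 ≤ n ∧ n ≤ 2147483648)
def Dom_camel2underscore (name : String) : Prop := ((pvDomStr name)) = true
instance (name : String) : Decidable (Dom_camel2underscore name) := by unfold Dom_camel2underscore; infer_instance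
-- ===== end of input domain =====

-- B recomputes the result in staged passes: lowercase flags, then boundary indices, then
-- slicing into words, then one underscore-join and one final lower (objective: alternative).

-- ===== PORT A =====
-- A's loop body: the char list is the accumulated `letters`, the Bool is `lastlower`.
def camel2underscoreStep (st : List Char × Bool) (l : Char) : List Char × Bool :=
  let thislower := PySem.Chars.islower l
  if !thislower then
    let letters := if st.2 then st.1 ++ ['_'] else st.1
    (letters ++ [PySem.Chars.lowerChar l], thislower)
  else
    (st.1 ++ [l], thislower)

def camel2underscore (name : String) : String :=
  String.ofList (name.toList.foldl camel2underscoreStep ([], false)).1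

-- ===== PORT B =====
def camel2underscore_alt (name : String) : String :=
  let cs := name.toList
  -- lowers = [c.islower() for c in name]
  let lowers := cs.map PySem.Chars.islower
  -- cuts = [i for i in range(1, len(name)) if lowers[i-1] and not lowers[i]]
  let cuts := (PySem.List.pyRange 1 (cs.length : Int) 1).filter
    (fun i => PySem.List.pyGetD lowers (i - 1) false && !(PySem.List.pyGetD lowers i false))
  -- for cut in cuts: parts.append(name[start:cut]); start = cut
  let r := cuts.foldl (fun (st : Int × List (List Char)) cut =>
      (cut, st.2 ++ [PySem.List.slice cs (some st.1) (some cut)])) (0, [])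
  -- parts.append(name[start:])
  let parts := r.2 ++ [PySem.List.slice cs (some r.1) none]
  -- return "_".join(parts).lower()
  String.ofList (PySem.Chars.lower (PySem.Chars.join ['_'] parts))

-- ===== PRECONDITION & SPEC =====
def Spec_camel2underscore (name : String) (out : String) : Prop := out = camel2underscore_alt name
instance (name : String) (out : String) : Decidable (Spec_camel2underscore name out) := by unfold Spec_camel2underscore; infer_instance

-- ===== CLAIM (what is proved, stated in full; the proofs are below) =====
def Claim_equal_camel2underscore : Prop := ∀ (name : String), Dom_camel2underscore name → Spec_camel2underscore name (camel2underscore name)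

-- ===== LEMMAS AND PROOFS =====

-- The common reference output, produced char by char with the previous char's lowercase flag.
def gOut : Bool → List Char → List Char
  | _, [] => []
  | ll, c :: rest =>
      (if ll && !PySem.Chars.islower c then ['_'] else []) ++
        PySem.Chars.lowerChar c :: gOut (PySem.Chars.islower c) rest

-- B's parts list, as a recursion over the cut list.
def partsRec (cs : List Char) : Nat → List Int → List (List Char)
  | s, [] => [cs.drop s]
  | s, k :: ks => (cs.drop s).take (k.toNat - s) :: partsRec cs k.toNat ks

-- lastlower as a function of position: the flag A carries entering index s.
def flagF (cs : List Char) (s : Nat) : Bool :=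
  if s = 0 then false else PySem.Chars.islower (cs.getD (s - 1) ' ')

-- does A emit '_' just before index s?
def pcond (cs : List Char) (s : Nat) : Bool :=
  decide (s < cs.length) && flagF cs s && !(PySem.Chars.islower (cs.getD s ' '))

-- B's boundary predicate (on the lowers list of cs).
def pbP (cs : List Char) (i : Int) : Bool :=
  PySem.List.pyGetD (cs.map PySem.Chars.islower) (i - 1) false &&
    !(PySem.List.pyGetD (cs.map PySem.Chars.islower) i false)

theorem pv_lowerChar_of_islower {c : Char} (h : PySem.Chars.islower c = true) :
    PySem.Chars.lowerChar c = c := by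
  simp only [PySem.Chars.islower, Bool.and_eq_true, decide_eq_true_eq] at h
  simp only [PySem.Chars.lowerChar]
  rw [if_neg]
  intro hu
  simp only [PySem.Chars.isupper, Bool.and_eq_true, decide_eq_true_eq] at hu
  exact absurd (le_trans h.1 hu.2) (by decide)

-- A's fold equals the reference output.
theorem pv_A_eq_gOut (cs : List Char) :
    ∀ (letters : List Char) (ll : Bool),
      (cs.foldl camel2underscoreStep (letters, ll)).1 = letters ++ gOut ll cs := by
  induction cs with
  | nil => intro letters ll; simp [gOut]
  | cons c rest ih =>
    intro letters ll
    rw [List.foldl_cons]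
    by_cases hc : PySem.Chars.islower c = true
    · have : camel2underscoreStep (letters, ll) c = (letters ++ [c], PySem.Chars.islower c) := by
        simp [camel2underscoreStep, hc]
      rw [this, ih]
      simp [gOut, hc, pv_lowerChar_of_islower hc]
    · have hc' : PySem.Chars.islower c = false := by simpa using hc
      by_cases hll : ll = true
      · have : camel2underscoreStep (letters, ll) c
            = (letters ++ ['_'] ++ [PySem.Chars.lowerChar c], PySem.Chars.islower c) := by
          simp [camel2underscoreStep, hc', hll]
        rw [this, ih]
        simp [gOut, hc', hll]
      · have hll' : ll = false := by simpa using hll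
        have : camel2underscoreStep (letters, ll) c
            = (letters ++ [PySem.Chars.lowerChar c], PySem.Chars.islower c) := by
          simp [camel2underscoreStep, hc', hll']
        rw [this, ih]
        simp [gOut, hc', hll']

-- B's fold over the cuts equals partsRec.
theorem pv_fold_eq_partsRec (cs : List Char) :
    ∀ (cuts : List Int) (s : Nat) (parts : List (List Char)),
      (∀ k ∈ cuts, 0 ≤ k) →
      (let r := cuts.foldl (fun (st : Int × List (List Char)) cut =>
          (cut, st.2 ++ [PySem.List.slice cs (some st.1) (some cut)])) ((s : Int), parts);
        r.2 ++ [PySem.List.slice cs (some r.1) none])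
      = parts ++ partsRec cs s cuts := by
  intro cuts
  induction cuts with
  | nil =>
    intro s parts _
    simp [partsRec, PySem.List.slice_from_natCast]
  | cons k ks ih =>
    intro s parts hpos
    have hk : 0 ≤ k := hpos k (by simp)
    have hkc : k = ((k.toNat : Nat) : Int) := by omega
    rw [List.foldl_cons]
    have hslice : PySem.List.slice cs (some (s : Int)) (some k)
        = (cs.drop s).take (k.toNat - s) := by
      rw [hkc, PySem.List.slice_natCast]
      norm_num
      omega
    rw [hslice]
    have ih' := ih k.toNat (parts ++ [(cs.drop s).take (k.toNat - s)])
      (fun x hx => hpos x (by simp [hx]))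
    simp only at ih'
    rw [← hkc] at ih'
    rw [ih']
    simp [partsRec]

theorem pv_partsRec_head (cs : List Char) (s : Nat) (c : Char)
    (hdrop : cs.drop s = c :: cs.drop (s + 1)) (ks : List Int)
    (hks : ∀ k ∈ ks, ((s : Int) + 1) ≤ k) :
    ∃ w ws, partsRec cs (s + 1) ks = w :: ws ∧ partsRec cs s ks = (c :: w) :: ws := by
  cases ks with
  | nil =>
    exact ⟨cs.drop (s + 1), [], rfl, by simp [partsRec, hdrop]⟩
  | cons k ks' =>
    have hk : s + 1 ≤ k.toNat := by have := hks k (by simp); omega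
    refine ⟨(cs.drop (s + 1)).take (k.toNat - (s + 1)), partsRec cs k.toNat ks', rfl, ?_⟩
    simp only [partsRec, hdrop]
    have : k.toNat - s = (k.toNat - (s + 1)) + 1 := by omega
    rw [this, List.take_succ_cons]

theorem pv_join_head (sep : List Char) (c : Char) (w : List Char) (ws : List (List Char)) :
    PySem.Chars.join sep ((c :: w) :: ws) = c :: PySem.Chars.join sep (w :: ws) := by
  cases ws with
  | nil => simp [PySem.Chars.join_singleton]
  | cons b ws' => rw [PySem.Chars.join_cons_cons, PySem.Chars.join_cons_cons]; simp

theorem pv_partsRec_cons (cs : List Char) (s : Nat) (ks : List Int) :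
    ∃ w ws, partsRec cs s ks = w :: ws := by
  cases ks with
  | nil => exact ⟨_, _, rfl⟩
  | cons k ks' => exact ⟨_, _, rfl⟩

-- The main correspondence: from position s on, the reference output equals B's
-- lowered join of the slices at the boundary cuts beyond s.
theorem pv_main (cs : List Char) :
    ∀ (m s : Nat), cs.length = s + m →
      gOut (flagF cs s) (cs.drop s)
        = (if pcond cs s then ['_'] else []) ++
          PySem.Chars.lower (PySem.Chars.join ['_']
            (partsRec cs s ((PySem.List.pyRange ((s : Int) + 1) (cs.length : Int) 1).filter (pbP cs)))) := by
  intro m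
  induction m with
  | zero =>
    intro s hs
    have hdrop : cs.drop s = [] := by rw [List.drop_eq_nil_iff]; omega
    have hrange : PySem.List.pyRange ((s : Int) + 1) (cs.length : Int) 1 = [] :=
      PySem.List.pyRange_one_eq_nil (by omega)
    have hpc : pcond cs s = false := by simp [pcond]; omega
    simp [hdrop, gOut, hrange, partsRec, hpc, PySem.Chars.join_singleton, PySem.Chars.lower]
  | succ m' ih =>
    intro s hs
    have hslen : s < cs.length := by omega
    have hdrop : cs.drop s = cs[s] :: cs.drop (s + 1) := (List.getElem_cons_drop hslen).symm
    have hgetDs : cs[s]?.getD ' ' = cs[s] := by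
      simp [List.getElem?_eq_getElem hslen]
    have hflag1 : flagF cs (s + 1) = PySem.Chars.islower cs[s] := by
      simp [flagF, hgetDs]
    have hpc : pcond cs s = (flagF cs s && !PySem.Chars.islower cs[s]) := by
      simp [pcond, hslen]
    have hg : gOut (flagF cs s) (cs.drop s)
        = (if pcond cs s then ['_'] else []) ++
            PySem.Chars.lowerChar cs[s] :: gOut (PySem.Chars.islower cs[s]) (cs.drop (s + 1)) := by
      rw [hdrop]; simp [gOut, hpc]
    rw [hg]
    have ih' := ih (s + 1) (by omega)
    rw [hflag1] at ih'
    by_cases hend : m' = 0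
    · -- s + 1 = length: the tail is empty and there are no cuts beyond s
      subst hend
      have hdrop1 : cs.drop (s + 1) = [] := by rw [List.drop_eq_nil_iff]; omega
      have hrange : PySem.List.pyRange ((s : Int) + 1) (cs.length : Int) 1 = [] :=
        PySem.List.pyRange_one_eq_nil (by omega)
      rw [hrange]
      simp only [List.filter_nil, partsRec, PySem.Chars.join_singleton]
      have hx : PySem.Chars.lower (cs.drop s) = [PySem.Chars.lowerChar cs[s]] := by
        rw [hdrop, hdrop1]; rfl
      rw [hdrop1, hx]
      simp [gOut]
    · -- s + 1 < length
      have hs1 : s + 1 < cs.length := by omega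
      have hstep : PySem.List.pyRange ((s : Int) + 1) (cs.length : Int) 1
          = ((s : Int) + 1) :: PySem.List.pyRange ((s : Int) + 2) (cs.length : Int) 1 := by
        have := PySem.List.pyRange_one_cons (a := (s : Int) + 1) (b := (cs.length : Int)) (by omega)
        simpa [add_assoc] using this
      have hpb : pbP cs ((s : Int) + 1) = pcond cs (s + 1) := by
        have h1 : ((s : Int) + 1) - 1 = ((s : Nat) : Int) := by omega
        have h2 : ((s : Int) + 1) = (((s + 1 : Nat) : Nat) : Int) := by push_cast; ring
        simp only [pbP, h2, PySem.List.pyGetD_natCast]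
        simp [pcond, hs1, flagF, List.getD, List.getElem?_map,
          List.getElem?_eq_getElem hslen]
      have hcast2 : ((s : Int) + 2) = (((s + 1 : Nat) : Int) + 1) := by push_cast; ring
      rw [hstep, List.filter_cons]
      obtain ⟨w, ws, hw⟩ := pv_partsRec_cons cs (s + 1)
        ((PySem.List.pyRange ((s : Int) + 2) (cs.length : Int) 1).filter (pbP cs))
      by_cases hb : pbP cs ((s : Int) + 1) = true
      · -- boundary at s+1: a new word starts there
        rw [if_pos hb]
        have hparts : partsRec cs s (((s : Int) + 1) ::
            (PySem.List.pyRange ((s : Int) + 2) (cs.length : Int) 1).filter (pbP cs))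
            = [cs[s]] :: partsRec cs (s + 1)
                ((PySem.List.pyRange ((s : Int) + 2) (cs.length : Int) 1).filter (pbP cs)) := by
          have ht : ((s : Int) + 1).toNat = s + 1 := by omega
          have h1 : s + 1 - s = 1 := by omega
          simp only [partsRec, ht, hdrop, h1, List.take_succ_cons, List.take_zero]
        have hpcs1 : pcond cs (s + 1) = true := by rw [← hpb]; exact hb
        rw [← hcast2] at ih'
        rw [hparts, hw, PySem.Chars.join_cons_cons, ih', hpcs1, hw]
        have hus : PySem.Chars.lowerChar '_' = '_' := by decide
        simp [PySem.Chars.lower, hus]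
      · -- no boundary at s+1: the current word continues
        have hb' : ¬ (pbP cs ((s : Int) + 1) = true) := hb
        rw [if_neg hb']
        have hbf : pbP cs ((s : Int) + 1) = false := by simpa using hb
        have hks : ∀ k ∈ (PySem.List.pyRange ((s : Int) + 2) (cs.length : Int) 1).filter (pbP cs),
            ((s : Int) + 1) ≤ k := by
          intro k hkmem
          have := (PySem.List.mem_pyRange_one).1 (List.mem_of_mem_filter hkmem)
          omega
        obtain ⟨w', ws', hw1, hw2⟩ := pv_partsRec_head cs s cs[s] hdrop _ hks
        have hpcs1 : pcond cs (s + 1) = false := by rw [← hpb]; exact hbf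
        rw [← hcast2] at ih'
        rw [hw2, pv_join_head, ih', hpcs1, hw1]
        simp [PySem.Chars.lower]

-- ===== VERDICT (by name: the statement is the Claim_ definition above) =====
theorem camel2underscore_spec : Claim_equal_camel2underscore := by
  intro name _
  unfold Spec_camel2underscore camel2underscore camel2underscore_alt
  simp only []
  refine congrArg String.ofList ?_
  rw [pv_A_eq_gOut name.toList [] false]
  simp only [List.nil_append]
  have hfold := pv_fold_eq_partsRec name.toList
    ((PySem.List.pyRange 1 ((name.toList).length : Int) 1).filter
      (fun i => PySem.List.pyGetD ((name.toList).map PySem.Chars.islower) (i - 1) false &&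
        !(PySem.List.pyGetD ((name.toList).map PySem.Chars.islower) i false))) 0 []
    (by intro k hk
        have := (PySem.List.mem_pyRange_one).1 (List.mem_of_mem_filter hk)
        omega)
  simp only [Nat.cast_zero, List.nil_append] at hfold
  rw [hfold]
  have hpred : (fun i : Int => PySem.List.pyGetD ((name.toList).map PySem.Chars.islower) (i - 1) false &&
      !(PySem.List.pyGetD ((name.toList).map PySem.Chars.islower) i false)) = pbP name.toList := rfl
  rw [hpred]
  have hmain := pv_main name.toList name.toList.length 0 (by omega)
  have hflag0 : flagF name.toList 0 = false := rfl
  have hpc0 : pcond name.toList 0 = false := by simp [pcond, flagF]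
  rw [hflag0, hpc0] at hmain
  have hone : (((0 : Nat) : Int) + 1) = 1 := by norm_num
  rw [hone] at hmain
  simpa using hmain
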